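-- pv_equiv track=rewrite | github.com/shuishui-YHD/pyccb-code | 78编程语言转译器（py）.py | text_to_ccb
-- ===== SOURCE A (Python) =====
-- def text_to_ccb(text):
--     """将文本转换为鸡py语言的二进制形式（统一使用16位编码）"""
--     ccb_code = []
--     for char in text:
--         code_point = ord(char)
--         binary = bin(code_point)[2:].zfill(16)  # 统一使用16位表示
--         ccb_char = binary.replace('0', '鸡').replace('1', '巴')
--         ccb_code.append(ccb_char)
--     return ''.join(ccb_code)
-- ===== SOURCE B (Python) =====
-- def text_to_ccb(text):
--     parts = []
--     for char in text:
--         cp = ord(char)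
--         w = max(16, cp.bit_length())
--         buf = []
--         for i in range(w - 1, -1, -1):
--             buf.append('巴' if (cp >> i) & 1 else '鸡')
--         parts.append(''.join(buf))
--     return ''.join(parts)
-- ===== Notes on version B (the rewrite author's own statement) =====
-- stated objective: alternative
-- what changed: Replaced the bin()/zfill/replace string-formatting pipeline with a direct bit-by-bit loop: for each character it scans width max(16, bit_length) bits from high to low and emits the emoji for each bit, building the output directly with no intermediate binary-digit string.
import Mathlib
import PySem

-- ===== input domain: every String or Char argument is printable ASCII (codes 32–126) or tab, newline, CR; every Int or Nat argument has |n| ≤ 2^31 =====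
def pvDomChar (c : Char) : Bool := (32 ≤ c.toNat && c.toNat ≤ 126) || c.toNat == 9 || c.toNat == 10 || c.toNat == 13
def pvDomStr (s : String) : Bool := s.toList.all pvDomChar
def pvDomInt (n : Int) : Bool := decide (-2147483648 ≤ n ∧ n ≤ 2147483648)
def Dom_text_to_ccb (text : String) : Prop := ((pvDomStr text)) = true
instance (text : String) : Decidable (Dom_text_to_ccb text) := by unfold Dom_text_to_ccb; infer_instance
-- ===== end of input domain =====

-- B replaces A's bin()/zfill/replace formatting pipeline by a direct high-to-low bit loop (alternative decomposition, same cost).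


-- ===== PORT A =====
-- bin(n)[2:] : minimal binary digits; one zero digit for n = 0 (Nat.toDigits 2 matches this)
def pvBinDigits (n : Nat) : List Char := Nat.toDigits 2 n

-- .zfill(16)
def pvZfill16 (l : List Char) : List Char := List.replicate (16 - l.length) '0' ++ l

-- the two sequential single-char replaces of A = a per-char map (the first replacement char is not a digit)
def pvRepl (c : Char) : Char := if c = '0' then '鸡' else if c = '1' then '巴' else c

def text_to_ccb (text : String) : String :=
  let ccb_code := text.toList.foldl
    (fun acc char =>
      let code_point := char.toNat
      let binary := pvZfill16 (pvBinDigits code_point)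
      let ccb_char := binary.map pvRepl
      acc ++ [ccb_char])
    ([] : List (List Char))
  String.ofList ccb_code.flatten

-- ===== PORT B =====
-- per-character bit loop: i from w-1 down to 0, append '巴' / '鸡'
def pvAltChar (cp : Nat) : List Char :=
  let w := max 16 cp.size
  ((List.range w).reverse).foldl
    (fun buf i => buf ++ [if (cp >>> i) &&& 1 == 1 then '巴' else '鸡']) []

def text_to_ccb_alt (text : String) : String :=
  let parts := text.toList.foldl
    (fun acc char => acc ++ [pvAltChar char.toNat]) ([] : List (List Char))
  String.ofList parts.flatten

-- ===== PRECONDITION & SPEC =====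
def Spec_text_to_ccb (text : String) (out : String) : Prop := out = text_to_ccb_alt text
instance (text : String) (out : String) : Decidable (Spec_text_to_ccb text out) := by unfold Spec_text_to_ccb; infer_instance

-- ===== CLAIM (what is proved, stated in full; the proofs are below) =====
def Claim_equal_text_to_ccb : Prop := ∀ (text : String), Dom_text_to_ccb text → Spec_text_to_ccb text (text_to_ccb text)

-- ===== LEMMAS AND PROOFS =====

-- the two per-character encodings agree on every domain code point
theorem pv_char_eq : ∀ n : Nat, n < 128 →
    (pvZfill16 (pvBinDigits n)).map pvRepl = pvAltChar n := by decide

-- foldl-with-append = map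
theorem pv_foldl_map {α β : Type} (f : α → β) :
    ∀ (l : List α) (acc : List β),
      l.foldl (fun a c => a ++ [f c]) acc = acc ++ l.map f := by
  intro l
  induction l with
  | nil => simp
  | cons c t ih => intro acc; simp [List.foldl, ih]

theorem text_to_ccb_spec : Claim_equal_text_to_ccb := by
  intro text hdom
  unfold Spec_text_to_ccb text_to_ccb text_to_ccb_alt
  simp only [pv_foldl_map, List.nil_append]
  congr 1
  congr 1
  apply List.map_congr_left
  intro c hc
  have hd : pvDomChar c = true := by
    have := (List.all_eq_true.mp hdom) c hc
    exact this
  have hlt : c.toNat < 128 := by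
    simp only [pvDomChar, Bool.or_eq_true, Bool.and_eq_true,
      decide_eq_true_eq, beq_iff_eq] at hd
    omega
  exact pv_char_eq c.toNat hlt
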